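-- pv_equiv track=rewrite | github.com/wilmurillo-ai/Design-Assistant | .skills/openclaw-skills/skills/tianyedavid/finance-ocr-pro/scripts/md_to_html.py | _ensure_blank_lines_around_tables
-- ===== SOURCE A (Python) =====
-- def _ensure_blank_lines_around_tables(md: str) -> str:
--     """
--     Ensure blank lines surround <table>...</table> blocks so that
--     Markdown parsers treat them as block-level HTML (avoids <p><table>…).
--     """
--     lines = md.splitlines()
--     out: list[str] = []
--     i = 0
--     while i < len(lines):
--         line = lines[i]
--         stripped = line.strip().lower()
--
--         if stripped.startswith("<table>") or stripped.startswith("<table "):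
--             if out and out[-1].strip() != "":
--                 out.append("")
--             out.append(line)
--
--             if "</table>" not in stripped:
--                 i += 1
--                 while i < len(lines):
--                     out.append(lines[i])
--                     if "</table>" in lines[i].strip().lower():
--                         i += 1
--                         break
--                     i += 1
--             else:
--                 i += 1
--
--             if i < len(lines) and out and out[-1].strip() != "":
--                 out.append("")
--             continue
--
--         out.append(line)
--         i += 1
--
--     return "\n".join(out)
-- ===== SOURCE B (Python) =====
-- def _ensure_blank_lines_around_tables(md: str) -> str:
--     lines = md.splitlines()
--     # Pass 1: mark each line with (is a table-block start, closes a table block)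
--     marks = []
--     in_table = False
--     for line in lines:
--         low = line.strip().lower()
--         start = (not in_table) and (low.startswith("<table>") or low.startswith("<table "))
--         close = (in_table or start) and ("</table>" in low)
--         in_table = (in_table or start) and not close
--         marks.append((line, start, close))
--     # Pass 2: emit, inserting blank lines at block boundaries
--     out = []
--     for k, (line, start, close) in enumerate(marks):
--         if start and out and out[-1].strip() != "":
--             out.append("")
--         out.append(line)
--         if close and k != len(marks) - 1:
--             out.append("")
--     return "\n".join(out)
-- ===== Notes on version B (the rewrite author's own statement) =====
-- stated objective: alternative
-- what changed: Replaces A's single fused while-loop with a nested table-consuming inner loop and index juggling by two separate passes: a marking pass that flags each line as a table-block start/close via an in_table state machine, then an emission pass that inserts the blank lines at the marked boundaries.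
import Mathlib
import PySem

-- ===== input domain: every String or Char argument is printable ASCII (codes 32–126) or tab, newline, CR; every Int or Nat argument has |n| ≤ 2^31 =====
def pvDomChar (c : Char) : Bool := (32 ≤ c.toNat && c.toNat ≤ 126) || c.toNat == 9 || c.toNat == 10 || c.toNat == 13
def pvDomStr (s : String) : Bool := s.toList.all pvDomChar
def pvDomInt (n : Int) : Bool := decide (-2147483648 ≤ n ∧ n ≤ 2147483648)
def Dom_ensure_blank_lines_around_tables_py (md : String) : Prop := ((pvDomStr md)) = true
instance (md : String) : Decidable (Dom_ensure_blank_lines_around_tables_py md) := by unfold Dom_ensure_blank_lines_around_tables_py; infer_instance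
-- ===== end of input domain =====

-- B replaces A's fused while-loop (with its nested table-consuming inner loop) by two passes:
-- a marking pass computing per-line block-boundary flags, then an emission pass; same return value, simpler shape.

-- shared small predicates (literal fragments of both Pythons)
-- line.strip().lower()
def pvStripLow (l : String) : String := PySem.Str.lower (PySem.Str.strip l)
-- stripped.startswith("<table>") or stripped.startswith("<table ")
def pvIsStart (st : String) : Bool :=
  PySem.Str.startswith st "<table>" || PySem.Str.startswith st "<table "
-- `out and out[-1].strip() != ""` on a REVERSED accumulator (head = last appended)
def pvBlank (out : List String) : Bool :=
  !out.isEmpty && (PySem.Str.strip (out.headD "") != "")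

-- ===== PORT A =====
-- inner while: append lines until one whose strip().lower() contains "</table>"; returns (remaining, out)
def pvAInner : List String → List String → List String × List String
  | [], out => ([], out)
  | l :: rest, out =>
    if PySem.Str.isIn "</table>" (pvStripLow l) then (rest, l :: out)
    else pvAInner rest (l :: out)

lemma pvAInner_fst_le : ∀ (lines out : List String), (pvAInner lines out).1.length ≤ lines.length := by
  intro lines
  induction lines with
  | nil => intro out; simp [pvAInner]
  | cons l rest ih =>
    intro out
    simp only [pvAInner]
    split
    · simp
    · exact le_trans (ih (l :: out)) (by simp)

-- `if i < len(lines) and out and out[-1].strip() != "": out.append("")` after a table block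
def pvPost (rem out : List String) : List String :=
  if !rem.isEmpty && pvBlank out then "" :: out else out

-- A's main while-loop, accumulator reversed (Python appends at the end, we cons at the head)
def pvALoop : List String → List String → List String
  | [], out => out
  | line :: rest, out =>
    if pvIsStart (pvStripLow line) then
      if !(PySem.Str.isIn "</table>" (pvStripLow line)) then
        pvALoop (pvAInner rest (line :: (if pvBlank out then "" :: out else out))).1
          (pvPost (pvAInner rest (line :: (if pvBlank out then "" :: out else out))).1
                  (pvAInner rest (line :: (if pvBlank out then "" :: out else out))).2)
      else
        pvALoop rest (pvPost rest (line :: (if pvBlank out then "" :: out else out)))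
    else
      pvALoop rest (line :: out)
termination_by lines _ => lines.length
decreasing_by
  · exact Nat.lt_succ_of_le (pvAInner_fst_le _ _)
  · simp
  · simp

def ensure_blank_lines_around_tables_py (md : String) : String :=
  PySem.Str.join "\n" (pvALoop (PySem.Str.splitlines md) []).reverse

-- ===== PORT B =====
-- pass 1: mark each line with (is a table-block start, closes a table block), threading in_table
def pvBMark : List String → Bool → List (String × Bool × Bool)
  | [], _ => []
  | l :: rest, it =>
    let low := pvStripLow l
    let start := !it && pvIsStart low
    let close := (it || start) && PySem.Str.isIn "</table>" low
    (l, start, close) :: pvBMark rest ((it || start) && !close)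

-- pass 2: emit with blank lines at marked boundaries; `k != len(marks) - 1` is `rest ≠ []`
def pvBEmit : List (String × Bool × Bool) → List String → List String
  | [], out => out
  | (line, start, close) :: rest, out =>
    let out1 := if start && pvBlank out then "" :: out else out
    let out2 := line :: out1
    pvBEmit rest (if close && !rest.isEmpty then "" :: out2 else out2)

def ensure_blank_lines_around_tables_py_alt (md : String) : String :=
  PySem.Str.join "\n" (pvBEmit (pvBMark (PySem.Str.splitlines md) false) []).reverse

-- ===== PRECONDITION & SPEC =====
def Spec_ensure_blank_lines_around_tables_py (md : String) (out : String) : Prop := out = ensure_blank_lines_around_tables_py_alt md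
instance (md : String) (out : String) : Decidable (Spec_ensure_blank_lines_around_tables_py md out) := by unfold Spec_ensure_blank_lines_around_tables_py; infer_instance

-- ===== CLAIM (what is proved, stated in full; the proofs are below) =====
def Claim_equal_ensure_blank_lines_around_tables_py : Prop := ∀ (md : String), Dom_ensure_blank_lines_around_tables_py md → Spec_ensure_blank_lines_around_tables_py md (ensure_blank_lines_around_tables_py md)

-- ===== LEMMAS AND PROOFS =====

-- a line whose strip().lower() contains "</table>" does not strip to ""
lemma pvClose_strip_ne (l : String)
    (h : PySem.Str.isIn "</table>" (pvStripLow l) = true) :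
    (PySem.Str.strip l != "") = true := by
  by_contra hc
  have he : PySem.Str.strip l = "" := by
    simpa using hc
  rw [pvStripLow, he] at h
  exact absurd h (by decide)

lemma pvBMark_isEmpty (rest : List String) (b : Bool) :
    (pvBMark rest b).isEmpty = rest.isEmpty := by
  cases rest <;> rfl

-- A's inner while, seen from B's side: emitting the marks of a suffix in table state
lemma pvEmit_true_eq : ∀ (rest out : List String),
    pvBEmit (pvBMark rest true) out =
      pvBEmit (pvBMark (pvAInner rest out).1 false)
        (pvPost (pvAInner rest out).1 (pvAInner rest out).2) := by
  intro rest
  induction rest with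
  | nil =>
    intro out
    simp [pvBMark, pvAInner, pvBEmit, pvPost]
  | cons l rest ih =>
    intro out
    by_cases hcl : PySem.Str.isIn "</table>" (pvStripLow l) = true
    · simp only [pvBMark, pvBEmit, pvAInner, hcl]
      simp [pvBMark_isEmpty, pvPost, pvBlank, pvClose_strip_ne l hcl]
    · simp only [pvBMark, pvBEmit, pvAInner, hcl, Bool.not_true, Bool.and_false, Bool.false_and,
        Bool.true_or, Bool.not_false, Bool.and_true, Bool.false_eq_true, if_neg]
      simpa [hcl] using ih (l :: out)

-- main alignment: A's loop outside a table equals B's mark-then-emit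
lemma pvLoop_eq : ∀ (n : Nat) (lines out : List String), lines.length ≤ n →
    pvALoop lines out = pvBEmit (pvBMark lines false) out := by
  intro n
  induction n with
  | zero =>
    intro lines out h
    have : lines = [] := List.eq_nil_of_length_eq_zero (Nat.le_zero.mp h)
    subst this; simp [pvALoop, pvBMark, pvBEmit]
  | succ n ih =>
    intro lines out h
    cases lines with
    | nil => simp [pvALoop, pvBMark, pvBEmit]
    | cons line rest =>
      by_cases hs : pvIsStart (pvStripLow line) = true
      · by_cases hcl : PySem.Str.isIn "</table>" (pvStripLow line) = true
        · -- one-line table: close on the start line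
          rw [pvALoop]
          simp only [hs, hcl, Bool.not_true, if_true, if_false, Bool.false_eq_true]
          rw [ih rest _ (by simpa using Nat.lt_succ_iff.mp (by simpa using h))]
          simp only [pvBMark, pvBEmit, hs, hcl]
          simp [pvBMark_isEmpty, pvPost, pvBlank, pvClose_strip_ne line hcl]
        · -- multi-line table: A runs the inner while, B marks the suffix in table state
          rw [pvALoop]
          simp only [hs, hcl, if_true, Bool.not_false]
          have hlen : (pvAInner rest (line :: (if pvBlank out then "" :: out else out))).1.length ≤ n := by
            exact le_trans (pvAInner_fst_le _ _) (Nat.lt_succ_iff.mp (by simpa using h))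
          rw [ih _ _ hlen]
          simp only [pvBMark, pvBEmit, hs, hcl]
          simp only [Bool.and_false, Bool.false_and, Bool.and_true,
            Bool.not_false, Bool.true_and, if_false, Bool.false_eq_true, Bool.false_or]
          exact (pvEmit_true_eq rest _).symm
      · rw [pvALoop]
        simp only [hs, if_false, Bool.false_eq_true]
        rw [ih rest _ (by simpa using Nat.lt_succ_iff.mp (by simpa using h))]
        simp [pvBMark, pvBEmit, hs]

-- ===== VERDICT (by name: the statement is the Claim_ definition above) =====
theorem ensure_blank_lines_around_tables_py_spec : Claim_equal_ensure_blank_lines_around_tables_py := by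
  intro md _
  unfold Spec_ensure_blank_lines_around_tables_py ensure_blank_lines_around_tables_py ensure_blank_lines_around_tables_py_alt
  rw [pvLoop_eq (PySem.Str.splitlines md).length _ _ le_rfl]
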